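-- pv_equiv track=rewrite | github.com/LeiMa0324/Krone_official | krone_hierarchy/Krone_seq.py | find_largest_prefix_subsequence
-- ===== SOURCE A (Python) =====
-- def is_sublist(test, trains):
--     test_seq = '|'.join(test)
--     for train in trains:
--         train_seq = '|'.join(train)
--         if test_seq in train_seq:
--             return True
--     return False
--
-- def find_largest_prefix_subsequence(test, train_seqs):
--     if len(test) <= 1:
--         return [], (0, 0)
--     largest_prefix_subsequence = []
--     for i in range(0, len(test)):
--         subseq = test[: i+1]
--         is_sub = is_sublist(subseq, train_seqs)
--         if is_sub:
--             largest_prefix_subsequence.append(test[i])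
--         else:
--             return largest_prefix_subsequence, (0, i)
--     return largest_prefix_subsequence, (0, len(test))
-- ===== SOURCE B (Python) =====
-- def find_largest_prefix_subsequence(test, train_seqs):
--     if len(test) <= 1:
--         return [], (0, 0)
--     joined = ['|'.join(t) for t in train_seqs]
--
--     def ok(m):
--         s = '|'.join(test[:m])
--         return any(s in t for t in joined)
--
--     lo, hi = 0, len(test)
--     while lo < hi:
--         mid = (lo + hi + 1) // 2
--         if ok(mid):
--             lo = mid
--         else:
--             hi = mid - 1
--     return test[:lo], (0, lo)
-- ===== Notes on version B (the rewrite author's own statement) =====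
-- stated objective: alternative
-- what changed: B joins each train sequence once up front and binary-searches over the prefix length (substring membership of the joined prefix is monotone), instead of A's linear scan that re-joins every train sequence for every prefix length; on inputs where A exits at the first prefix the up-front joining makes B comparable, not faster.
import Mathlib
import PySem

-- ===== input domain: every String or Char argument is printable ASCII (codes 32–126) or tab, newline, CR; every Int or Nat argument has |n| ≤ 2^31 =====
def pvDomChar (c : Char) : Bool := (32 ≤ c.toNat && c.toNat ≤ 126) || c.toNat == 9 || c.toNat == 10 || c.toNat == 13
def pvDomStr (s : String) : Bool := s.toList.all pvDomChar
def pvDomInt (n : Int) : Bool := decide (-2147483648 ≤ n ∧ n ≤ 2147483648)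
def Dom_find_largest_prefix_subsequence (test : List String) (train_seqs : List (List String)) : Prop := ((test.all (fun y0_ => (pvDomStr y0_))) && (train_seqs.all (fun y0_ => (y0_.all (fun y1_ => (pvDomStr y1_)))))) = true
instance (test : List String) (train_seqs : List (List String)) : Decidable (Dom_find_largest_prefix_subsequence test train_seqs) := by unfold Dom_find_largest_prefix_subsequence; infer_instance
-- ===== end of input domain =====

-- B joins each train once and binary-searches over the prefix length (substring membership is monotone in the prefix) instead of A's linear scan with per-prefix re-joining.


-- ===== PORT A =====
-- is_sublist: joins test and each train with '|' and tests Python substring membership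
def is_sublist (test : List String) (trains : List (List String)) : Bool :=
  let test_seq := PySem.Str.join "|" test
  trains.any (fun train => PySem.Str.isIn test_seq (PySem.Str.join "|" train))

-- the 'for i in range(0, len(test))' loop of A, with its accumulator
def findA_loop (test : List String) (train_seqs : List (List String)) (i : Nat)
    (acc : List String) : List String × (Int × Int) :=
  if h : i < test.length then
    if is_sublist (PySem.List.slice test none (some ((i : Int) + 1))) train_seqs then
      findA_loop test train_seqs (i + 1) (acc ++ [test[i]])
    else (acc, (0, (i : Int)))
  else (acc, (0, (test.length : Int)))
termination_by test.length - i

def find_largest_prefix_subsequence (test : List String) (train_seqs : List (List String)) :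
    List String × (Int × Int) :=
  if test.length ≤ 1 then ([], (0, 0))
  else findA_loop test train_seqs 0 []

-- ===== PORT B =====
-- B: each train is joined once; ok m = '|'.join(test[:m]) is a substring of some joined train
def okB (test : List String) (joined : List String) (m : Nat) : Bool :=
  joined.any (fun t => PySem.Str.isIn (PySem.Str.join "|" (test.take m)) t)

-- the while-loop binary search of Source B over the prefix length
def bsearchB (test : List String) (joined : List String) (lo hi : Nat) : Nat :=
  if lo < hi then
    let mid := (lo + hi + 1) / 2
    if okB test joined mid then bsearchB test joined mid hi
    else bsearchB test joined lo (mid - 1)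
  else lo
termination_by hi - lo
decreasing_by all_goals omega

def find_largest_prefix_subsequence_alt (test : List String) (train_seqs : List (List String)) :
    List String × (Int × Int) :=
  if test.length ≤ 1 then ([], (0, 0))
  else
    let joined := train_seqs.map (fun t => PySem.Str.join "|" t)
    let lo := bsearchB test joined 0 test.length
    (test.take lo, (0, (lo : Int)))

-- ===== PRECONDITION & SPEC =====
def Spec_find_largest_prefix_subsequence (test : List String) (train_seqs : List (List String)) (out : List String × (Int × Int)) : Prop := out = find_largest_prefix_subsequence_alt test train_seqs
instance (test : List String) (train_seqs : List (List String)) (out : List String × (Int × Int)) : Decidable (Spec_find_largest_prefix_subsequence test train_seqs out) := by unfold Spec_find_largest_prefix_subsequence; infer_instance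

-- ===== CLAIM (what is proved, stated in full; the proofs are below) =====
def Claim_equal_find_largest_prefix_subsequence : Prop := ∀ (test : List String) (train_seqs : List (List String)), Dom_find_largest_prefix_subsequence test train_seqs → Spec_find_largest_prefix_subsequence test train_seqs (find_largest_prefix_subsequence test train_seqs)

-- ===== LEMMAS AND PROOFS =====

-- appending one element to a joined list only appends characters
theorem join_append_one (sep : List Char) (l : List (List Char)) (y : List Char) :
    ∃ suf, PySem.Chars.join sep (l ++ [y]) = PySem.Chars.join sep l ++ suf := by
  induction l with
  | nil => exact ⟨y, by simp [PySem.Chars.join, List.intercalate]⟩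
  | cons a t ih =>
    cases t with
    | nil => exact ⟨sep ++ y, by simp [PySem.Chars.join, List.intercalate]⟩
    | cons b t2 =>
      obtain ⟨suf, hs⟩ := ih
      refine ⟨suf, ?_⟩
      simp only [List.cons_append, PySem.Chars.join_cons_cons] at *
      rw [hs]; simp

-- ok is monotone: success for a longer prefix implies success for a shorter one
theorem join_take_prefix (test : List String) (m : Nat) :
    (PySem.Str.join "|" (test.take m)).toList <+: (PySem.Str.join "|" (test.take (m + 1))).toList := by
  rcases h' : test[m]? with _ | y
  · rw [List.take_add_one, h']; simp
  · rw [List.take_add_one, h']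
    simp only [PySem.Str.join, String.toList_ofList, Option.toList, List.map_append,
      List.map_cons, List.map_nil]
    obtain ⟨suf, hs⟩ := join_append_one "|".toList ((test.take m).map String.toList) y.toList
    exact ⟨suf, hs.symm⟩

theorem okB_mono_succ (test : List String) (joined : List String) (m : Nat)
    (h : okB test joined (m + 1) = true) : okB test joined m = true := by
  unfold okB at h ⊢
  rw [List.any_eq_true] at h ⊢
  obtain ⟨t, ht, hin⟩ := h
  refine ⟨t, ht, ?_⟩
  rw [PySem.Str.isIn_iff_infix] at hin ⊢
  exact ((join_take_prefix test m).isInfix).trans hin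

theorem okB_mono (test : List String) (joined : List String) {m n : Nat} (hmn : m ≤ n)
    (h : okB test joined n = true) : okB test joined m = true := by
  induction n with
  | zero => simpa [Nat.le_zero.mp hmn] using h
  | succ k ih =>
    rcases Nat.lt_or_ge m (k + 1) with hlt | hge
    · exact ih (by omega) (okB_mono_succ _ _ _ h)
    · have : m = k + 1 := by omega
      simpa [this] using h

-- A's per-iteration test equals B's ok of the corresponding prefix length
theorem is_sublist_eq_okB (test : List String) (train_seqs : List (List String)) (n : Nat) :
    is_sublist (PySem.List.slice test none (some ((n : Int) + 1))) train_seqs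
      = okB test (train_seqs.map (fun t => PySem.Str.join "|" t)) (n + 1) := by
  have hs : PySem.List.slice test none (some ((n : Int) + 1)) = test.take (n + 1) := by
    rw [PySem.List.slice_to test (by omega)]
    norm_num
  rw [hs]
  simp [is_sublist, okB, List.any_map, Function.comp_def]

-- fueled form of the binary-search invariant proof
theorem bsearchB_spec_fuel (test : List String) (joined : List String) (L : Nat) :
    ∀ d lo hi, hi - lo ≤ d → lo ≤ hi → hi ≤ L →
    (lo = 0 ∨ okB test joined lo = true) →
    (∀ m, hi < m → m ≤ L → okB test joined m = false) →
    (bsearchB test joined lo hi = 0 ∨ okB test joined (bsearchB test joined lo hi) = true) ∧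
    (∀ m, bsearchB test joined lo hi < m → m ≤ L → okB test joined m = false) ∧
    bsearchB test joined lo hi ≤ L := by
  intro d
  induction d with
  | zero =>
    intro lo hi hd hlo hhi h0 hafter
    have : ¬ lo < hi := by omega
    rw [bsearchB]; simp only [this, if_false]
    exact ⟨h0, fun m h1 h2 => hafter m (by omega) h2, by omega⟩
  | succ d ih =>
    intro lo hi hd hlo hhi h0 hafter
    by_cases hlt : lo < hi
    · rw [bsearchB]; simp only [hlt, if_true]
      have hmid1 : lo < (lo + hi + 1) / 2 := by omega
      have hmid2 : (lo + hi + 1) / 2 ≤ hi := by omega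
      by_cases hok : okB test joined ((lo + hi + 1) / 2) = true
      · simp only [hok, if_true]
        exact ih ((lo + hi + 1) / 2) hi (by omega) (by omega) hhi (Or.inr hok) hafter
      · simp only [hok]
        refine ih lo ((lo + hi + 1) / 2 - 1) (by omega) (by omega) (by omega) h0 ?_
        intro m h1 h2
        by_cases hmh : hi < m
        · exact hafter m hmh h2
        · rcases Bool.eq_false_or_eq_true (okB test joined m) with ht | hf
          · exact absurd (okB_mono test joined (show (lo + hi + 1) / 2 ≤ m by omega) ht) hok
          · exact hf
    · rw [bsearchB]; simp only [hlt, if_false]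
      exact ⟨h0, fun m h1 h2 => hafter m (by omega) h2, by omega⟩

-- bsearchB maintains its invariant and lands on the largest ok prefix length
theorem bsearchB_spec (test : List String) (joined : List String) (L : Nat)
    (lo hi : Nat) (hlo : lo ≤ hi) (hhi : hi ≤ L)
    (h0 : lo = 0 ∨ okB test joined lo = true)
    (hafter : ∀ m, hi < m → m ≤ L → okB test joined m = false) :
    (bsearchB test joined lo hi = 0 ∨ okB test joined (bsearchB test joined lo hi) = true) ∧
    (∀ m, bsearchB test joined lo hi < m → m ≤ L → okB test joined m = false) ∧
    bsearchB test joined lo hi ≤ L := by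
  exact bsearchB_spec_fuel test joined L (hi - lo) lo hi le_rfl hlo hhi h0 hafter

-- A's loop, run from i with all earlier checks known true, produces (take K, (0,K))
theorem findA_loop_eq (test : List String) (train_seqs : List (List String)) (K : Nat)
    (hKL : K ≤ test.length)
    (hok : ∀ m, 1 ≤ m → m ≤ K → okB test (train_seqs.map (fun t => PySem.Str.join "|" t)) m = true)
    (hfail : ∀ m, K < m → m ≤ test.length → okB test (train_seqs.map (fun t => PySem.Str.join "|" t)) m = false) :
    ∀ i, i ≤ K → ∀ acc, findA_loop test train_seqs i acc
      = (acc ++ (test.take K).drop i, (0, (K : Int))) := by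
  suffices h : ∀ d i, K - i ≤ d → i ≤ K → ∀ acc, findA_loop test train_seqs i acc
      = (acc ++ (test.take K).drop i, (0, (K : Int))) by
    intro i hi acc; exact h (K - i) i le_rfl hi acc
  intro d
  induction d with
  | zero =>
    intro i hd hi acc
    have hiK : i = K := by omega
    subst hiK
    have hdrop : (test.take i).drop i = [] := by
      apply List.drop_eq_nil_of_le
      simp [List.length_take]
    by_cases hlen : i < test.length
    · rw [findA_loop]
      rw [dif_pos hlen, is_sublist_eq_okB, hfail (i + 1) (by omega) (by omega)]
      simp [hdrop]
    · have hiL : i = test.length := by omega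
      rw [findA_loop, dif_neg hlen]
      simp [hiL]
  | succ d ih =>
    intro i hd hi acc
    by_cases hiK : i = K
    · subst hiK
      have hdrop : (test.take i).drop i = [] := by
        apply List.drop_eq_nil_of_le
        simp [List.length_take]
      by_cases hlen : i < test.length
      · rw [findA_loop]
        rw [dif_pos hlen, is_sublist_eq_okB, hfail (i + 1) (by omega) (by omega)]
        simp [hdrop]
      · have hiL : i = test.length := by omega
        rw [findA_loop, dif_neg hlen]
        simp [hiL]
    · have hiK' : i < K := by omega
      have hlen : i < test.length := by omega
      rw [findA_loop, dif_pos hlen, is_sublist_eq_okB, hok (i + 1) (by omega) (by omega)]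
      simp only [if_true]
      rw [ih (i + 1) (by omega) (by omega) (acc ++ [test[i]])]
      have hlt : i < (test.take K).length := by simp [List.length_take]; omega
      rw [List.drop_eq_getElem_cons hlt]
      have : (test.take K)[i] = test[i] := List.getElem_take
      simp [this]

-- ===== VERDICT (by name: the statement is the Claim_ definition above) =====
theorem find_largest_prefix_subsequence_spec : Claim_equal_find_largest_prefix_subsequence := by
  intro test train_seqs _
  unfold Spec_find_largest_prefix_subsequence
  unfold find_largest_prefix_subsequence find_largest_prefix_subsequence_alt
  by_cases h1 : test.length ≤ 1
  · simp [h1]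
  · simp only [h1, if_false]
    set joined := train_seqs.map (fun t => PySem.Str.join "|" t) with hj
    set K := bsearchB test joined 0 test.length with hK
    obtain ⟨hfst, hsnd, hKL⟩ := bsearchB_spec test joined test.length 0 test.length
      (Nat.zero_le _) le_rfl (Or.inl rfl) (by intro m h1 h2; omega)
    have hok : ∀ m, 1 ≤ m → m ≤ K → okB test joined m = true := by
      intro m hm1 hmK
      rcases hfst with h0 | hkok
      · omega
      · exact okB_mono test joined hmK hkok
    have := findA_loop_eq test train_seqs K hKL hok hsnd 0 (Nat.zero_le _) []
    simpa using this
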